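-- pv_equiv track=rewrite | github.com/HaykTarkhanyan/infocom_rag | web_scraper.py | resolve_category_id
-- ===== SOURCE A (Python) =====
-- def resolve_category_id(name: str, category_map: dict[int, str]) -> int | None:
--     """Look up a category by name, slug, or ID string."""
--     # Try as numeric ID
--     try:
--         cid = int(name)
--         if cid in category_map:
--             return cid
--     except ValueError:
--         pass
--     # Try exact name match (case-insensitive)
--     for cid, cname in category_map.items():
--         if cname.lower() == name.lower():
--             return cid
--     # Try slug-style match
--     for cid, cname in category_map.items():
--         if name.lower().replace(" ", "-") in cname.lower().replace(" ", "-"):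
--             return cid
--     return None
-- ===== SOURCE B (Python) =====
-- def resolve_category_id(name: str, category_map: dict[int, str]) -> int | None:
--     """Look up a category by name, slug, or ID string (single-pass version)."""
--     try:
--         cid = int(name)
--         if cid in category_map:
--             return cid
--     except ValueError:
--         pass
--     name_l = name.lower()
--     slug = name_l.replace(" ", "-")
--     candidate = None
--     for cid, cname in category_map.items():
--         if cname.lower() == name_l:
--             return cid
--         if candidate is None and slug in cname.lower().replace(" ", "-"):
--             candidate = cid
--     return candidate
-- ===== Notes on version B (the rewrite author's own statement) =====
-- stated objective: faster
-- what changed: The two sequential scans (exact-name scan, then slug-substring scan) are fused into one pass that returns immediately on an exact match and records the first slug candidate on the fly, with name.lower() and the slug computed once instead of per item.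
import Mathlib
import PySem

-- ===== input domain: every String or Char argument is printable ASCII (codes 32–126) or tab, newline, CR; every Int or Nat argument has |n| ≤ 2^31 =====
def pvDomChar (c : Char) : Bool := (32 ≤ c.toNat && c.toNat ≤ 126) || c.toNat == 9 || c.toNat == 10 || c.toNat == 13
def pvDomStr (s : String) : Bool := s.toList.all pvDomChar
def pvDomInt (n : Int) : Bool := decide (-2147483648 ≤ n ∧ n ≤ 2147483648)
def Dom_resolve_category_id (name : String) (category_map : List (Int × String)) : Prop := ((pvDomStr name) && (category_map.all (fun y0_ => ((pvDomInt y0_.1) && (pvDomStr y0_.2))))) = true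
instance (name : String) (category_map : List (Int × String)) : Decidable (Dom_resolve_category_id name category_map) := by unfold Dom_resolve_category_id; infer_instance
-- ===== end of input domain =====

-- B fuses A's two sequential scans (exact-name, then slug-substring) into one pass
-- recording the first slug candidate on the fly; same return value everywhere.

-- ===== PORT A =====
-- first scan: exact case-insensitive name match
def pvFindExact (name : String) : List (Int × String) → Option Int
  | [] => none
  | (cid, cname) :: rest =>
    if PySem.Str.lower cname == PySem.Str.lower name then some cid
    else pvFindExact name rest

-- second scan: slug-style substring match
def pvFindSlug (name : String) : List (Int × String) → Option Int
  | [] => none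
  | (cid, cname) :: rest =>
    if PySem.Str.isIn (PySem.Str.replace (PySem.Str.lower name) " " "-")
        (PySem.Str.replace (PySem.Str.lower cname) " " "-") then some cid
    else pvFindSlug name rest

-- the part of A after the numeric-ID attempt: exact scan, then slug scan
def pvAfterNumeric (name : String) (category_map : List (Int × String)) : Option Int :=
  match pvFindExact name category_map with
  | some cid => some cid
  | none => pvFindSlug name category_map

def resolve_category_id (name : String) (category_map : List (Int × String)) : Option Int :=
  match PySem.Int.ofStr? name with
  | some cid =>
    if category_map.any (fun p => p.1 == cid) then some cid
    else pvAfterNumeric name category_map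
  | none => pvAfterNumeric name category_map

-- ===== PORT B =====
-- single pass: return on exact match, record the first slug candidate
def pvOnePass (nameL slug : String) : List (Int × String) → Option Int → Option Int
  | [], cand => cand
  | (cid, cname) :: rest, cand =>
    if PySem.Str.lower cname == nameL then some cid
    else if cand.isNone && PySem.Str.isIn slug (PySem.Str.replace (PySem.Str.lower cname) " " "-") then
      pvOnePass nameL slug rest (some cid)
    else pvOnePass nameL slug rest cand

def resolve_category_id_alt (name : String) (category_map : List (Int × String)) : Option Int :=
  match PySem.Int.ofStr? name with
  | some cid =>
    if category_map.any (fun p => p.1 == cid) then some cid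
    else pvOnePass (PySem.Str.lower name) (PySem.Str.replace (PySem.Str.lower name) " " "-") category_map none
  | none => pvOnePass (PySem.Str.lower name) (PySem.Str.replace (PySem.Str.lower name) " " "-") category_map none

-- ===== PRECONDITION & SPEC =====
def Spec_resolve_category_id (name : String) (category_map : List (Int × String)) (out : Option Int) : Prop := out = resolve_category_id_alt name category_map
instance (name : String) (category_map : List (Int × String)) (out : Option Int) : Decidable (Spec_resolve_category_id name category_map out) := by unfold Spec_resolve_category_id; infer_instance

-- ===== CLAIM (what is proved, stated in full; the proofs are below) =====
def Claim_equal_resolve_category_id : Prop := ∀ (name : String) (category_map : List (Int × String)), Dom_resolve_category_id name category_map → Spec_resolve_category_id name category_map (resolve_category_id name category_map)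

-- ===== LEMMAS AND PROOFS =====

-- the single pass with a recorded candidate equals A's two sequential scans
lemma pvOnePass_eq (name : String) (cm : List (Int × String)) (cand : Option Int) :
    pvOnePass (PySem.Str.lower name) (PySem.Str.replace (PySem.Str.lower name) " " "-") cm cand
      = match pvFindExact name cm with
        | some c => some c
        | none => match cand with
          | some c => some c
          | none => pvFindSlug name cm := by
  induction cm generalizing cand with
  | nil => cases cand <;> simp [pvOnePass, pvFindExact, pvFindSlug]
  | cons hd tl ih =>
    obtain ⟨cid, cname⟩ := hd
    by_cases hx : (PySem.Str.lower cname == PySem.Str.lower name) = true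
    · simp [pvOnePass, pvFindExact, hx]
    · cases cand with
      | some c =>
        simp [pvOnePass, pvFindExact, hx, ih]
      | none =>
        by_cases hs : PySem.Str.isIn (PySem.Str.replace (PySem.Str.lower name) " " "-")
            (PySem.Str.replace (PySem.Str.lower cname) " " "-") = true
        all_goals
          simp [pvOnePass, pvFindExact, pvFindSlug, hx, ih]
          cases pvFindExact name tl <;> simp

-- ===== VERDICT (by name: the statement is the Claim_ definition above) =====
theorem resolve_category_id_spec : Claim_equal_resolve_category_id := by
  intro name cm _
  unfold Spec_resolve_category_id resolve_category_id resolve_category_id_alt pvAfterNumeric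
  cases PySem.Int.ofStr? name with
  | none => rw [pvOnePass_eq]
  | some cid =>
    by_cases h : cm.any (fun p => p.1 == cid) = true <;> simp [h, pvOnePass_eq]
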